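-- pv_equiv track=rewrite | github.com/PrasenWaikar/Python-Practices | Count Subarrays with Given XOR.py | subarray_xor
-- ===== SOURCE A (Python) =====
-- def subarray_xor(arr, target_xor):
--     xor_map = {}
--     count = 0
--     current_xor = 0
--
--     for num in arr:
--         current_xor ^= num
--         if current_xor == target_xor:
--             count += 1
--         count += xor_map.get(current_xor ^ target_xor, 0)
--         xor_map[current_xor] = xor_map.get(current_xor, 0) + 1
--
--     return count
-- ===== SOURCE B (Python) =====
-- def subarray_xor(arr, target_xor):
--     count = 0
--     n = len(arr)
--     for i in range(n):
--         cur = 0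
--         for j in range(i, n):
--             cur ^= arr[j]
--             if cur == target_xor:
--                 count += 1
--     return count
-- ===== Notes on version B (the rewrite author's own statement) =====
-- stated objective: simpler
-- what changed: Replaced the prefix-XOR hashmap counting with a plain nested loop that scans every start index and maintains a running XOR, so no dictionary or prefix-XOR bookkeeping is needed.
import Mathlib
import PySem

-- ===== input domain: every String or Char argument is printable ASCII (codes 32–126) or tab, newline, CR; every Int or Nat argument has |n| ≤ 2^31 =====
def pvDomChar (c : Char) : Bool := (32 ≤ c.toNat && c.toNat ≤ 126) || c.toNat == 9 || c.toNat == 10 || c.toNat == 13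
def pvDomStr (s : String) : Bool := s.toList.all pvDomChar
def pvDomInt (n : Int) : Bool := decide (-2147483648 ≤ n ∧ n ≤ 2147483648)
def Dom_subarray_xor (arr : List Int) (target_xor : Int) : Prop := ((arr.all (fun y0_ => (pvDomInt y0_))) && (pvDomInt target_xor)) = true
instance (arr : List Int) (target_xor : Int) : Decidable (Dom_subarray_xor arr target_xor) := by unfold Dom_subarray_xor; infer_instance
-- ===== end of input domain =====

-- B replaces A's prefix-XOR hashmap counting with a plain nested scan over all start
-- indices with a running XOR — simpler (no dictionary), at the cost of O(n^2) vs O(n).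

-- ===== PORT A =====
-- state: (xor_map, count, current_xor)
def subarray_xor (arr : List Int) (target_xor : Int) : Int :=
  (arr.foldl
    (fun (st : PySem.Dict Int Int × Int × Int) num =>
      let cx := PySem.Int.bxor st.2.2 num
      let c1 := if cx = target_xor then st.2.1 + 1 else st.2.1
      let c2 := c1 + st.1.getD (PySem.Int.bxor cx target_xor) 0
      (st.1.insert cx (st.1.getD cx 0 + 1), c2, cx))
    ((PySem.Dict.empty : PySem.Dict Int Int), 0, 0)).2.1

-- ===== PORT B =====
-- inner loop of Source B: running XOR `cur` over the remaining elements, counting hits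
def sxInner (t cur : Int) : List Int → Int
  | [] => 0
  | x :: xs =>
      let c := PySem.Int.bxor cur x
      (if c = t then 1 else 0) + sxInner t c xs

-- outer loop of Source B: one inner scan per start index (i.e. per suffix)
def sxOuter (t : Int) : List Int → Int
  | [] => 0
  | x :: xs => sxInner t 0 (x :: xs) + sxOuter t xs

def subarray_xor_alt (arr : List Int) (target_xor : Int) : Int :=
  sxOuter target_xor arr

-- ===== PRECONDITION & SPEC =====
def Spec_subarray_xor (arr : List Int) (target_xor : Int) (out : Int) : Prop := out = subarray_xor_alt arr target_xor
instance (arr : List Int) (target_xor : Int) (out : Int) : Decidable (Spec_subarray_xor arr target_xor out) := by unfold Spec_subarray_xor; infer_instance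

-- ===== CLAIM (what is proved, stated in full; the proofs are below) =====
def Claim_equal_subarray_xor : Prop := ∀ (arr : List Int) (target_xor : Int), Dom_subarray_xor arr target_xor → Spec_subarray_xor arr target_xor (subarray_xor arr target_xor)

-- ===== LEMMAS AND PROOFS =====

theorem bxor_eq_xor (a b : Int) : PySem.Int.bxor a b = a.xor b := by
  rcases a with m | m <;> rcases b with n | n <;>
    simp [PySem.Int.bxor, Int.xor, Int.negSucc_eq] <;> omega

theorem ixor_assoc (a b c : Int) : (Int.xor a b).xor c = a.xor (b.xor c) := by
  rcases a with m | m <;> rcases b with n | n <;> rcases c with k | k <;>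
    simp [Int.xor, Nat.xor_assoc]

theorem bxor_assoc (a b c : Int) :
    PySem.Int.bxor (PySem.Int.bxor a b) c = PySem.Int.bxor a (PySem.Int.bxor b c) := by
  simp [bxor_eq_xor, ixor_assoc]

theorem bxor_right_comm (a b c : Int) :
    PySem.Int.bxor (PySem.Int.bxor a b) c = PySem.Int.bxor (PySem.Int.bxor a c) b := by
  rw [bxor_assoc, bxor_assoc, PySem.Int.bxor_comm b c]

theorem bxor_self_left (a b : Int) : PySem.Int.bxor a (PySem.Int.bxor a b) = b := by
  rw [← bxor_assoc, PySem.Int.bxor_self]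
  rw [PySem.Int.bxor_comm, PySem.Int.bxor_zero]

theorem bxor_eq_iff (a b t : Int) : PySem.Int.bxor a b = t ↔ b = PySem.Int.bxor a t := by
  constructor
  · intro h; rw [← h, bxor_self_left]
  · intro h; rw [h, bxor_self_left]

theorem sum_map_add_split (f g : Int → Int) (l : List Int) :
    (l.map (fun s => f s + g s)).sum = (l.map f).sum + (l.map g).sum := by
  induction l with
  | nil => simp
  | cons y ys ih => simp [ih]; ring

theorem sum_indicator_eq_count (w : Int) (l : List Int) :
    (l.map (fun s => if s = w then (1 : Int) else 0)).sum = (l.count w : Int) := by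
  induction l with
  | nil => simp
  | cons y ys ih =>
      simp only [List.map_cons, List.sum_cons, ih, List.count_cons]
      by_cases h : y = w
      · subst h; simp; omega
      · simp [h]

-- the sum over already-seen prefix xors, one step of the list later
theorem map_sxInner_shift (t cur x : Int) (rest seen : List Int) :
    (seen.map (fun s => sxInner t (PySem.Int.bxor cur s) (x :: rest))).sum
      = (seen.count (PySem.Int.bxor (PySem.Int.bxor cur x) t) : Int)
        + (seen.map (fun s => sxInner t (PySem.Int.bxor (PySem.Int.bxor cur x) s) rest)).sum := by
  have hpt : ∀ s : Int, sxInner t (PySem.Int.bxor cur s) (x :: rest)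
      = (if s = PySem.Int.bxor (PySem.Int.bxor cur x) t then (1 : Int) else 0)
        + sxInner t (PySem.Int.bxor (PySem.Int.bxor cur x) s) rest := by
    intro s
    have hsw : PySem.Int.bxor (PySem.Int.bxor cur s) x
        = PySem.Int.bxor (PySem.Int.bxor cur x) s := bxor_right_comm cur s x
    simp only [sxInner, hsw]
    congr 1
    by_cases h : PySem.Int.bxor (PySem.Int.bxor cur x) s = t
    · rw [if_pos h, if_pos ((bxor_eq_iff _ _ _).mp h)]
    · rw [if_neg h, if_neg (fun hc => h ((bxor_eq_iff _ _ _).mpr hc))]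
  calc (seen.map (fun s => sxInner t (PySem.Int.bxor cur s) (x :: rest))).sum
      = (seen.map (fun s => (if s = PySem.Int.bxor (PySem.Int.bxor cur x) t then (1 : Int) else 0)
          + sxInner t (PySem.Int.bxor (PySem.Int.bxor cur x) s) rest)).sum := by
        congr 1; exact List.map_congr_left (fun s _ => hpt s)
    _ = _ := by
        rw [sum_map_add_split, sum_indicator_eq_count]

theorem sxOuter_eq_tail (t : Int) (xs : List Int) :
    sxOuter t xs = sxOuter t xs.tail + sxInner t 0 xs := by
  cases xs with
  | nil => simp [sxOuter, sxInner]
  | cons y ys => simp [sxOuter]; ring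

-- main invariant: A's fold, run from a dict that tallies the list `seen` of already-seen
-- prefix xors, counts exactly what B's remaining nested scans count
theorem fold_invariant (t : Int) (xs : List Int) :
    ∀ (d : PySem.Dict Int Int) (seen : List Int) (c cur : Int),
    (∀ v, d.getD v 0 = (seen.count v : Int)) →
    (xs.foldl
      (fun (st : PySem.Dict Int Int × Int × Int) num =>
        let cx := PySem.Int.bxor st.2.2 num
        let c1 := if cx = t then st.2.1 + 1 else st.2.1
        let c2 := c1 + st.1.getD (PySem.Int.bxor cx t) 0
        (st.1.insert cx (st.1.getD cx 0 + 1), c2, cx))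
      (d, c, cur)).2.1
      = c + sxOuter t xs.tail + sxInner t cur xs
          + (seen.map (fun s => sxInner t (PySem.Int.bxor cur s) xs)).sum := by
  induction xs with
  | nil => intro d seen c cur _; simp [sxOuter, sxInner]
  | cons x rest ih =>
      intro d seen c cur hm
      simp only [List.foldl_cons]
      have hm' : ∀ v,
          (d.insert (PySem.Int.bxor cur x) (d.getD (PySem.Int.bxor cur x) 0 + 1)).getD v 0
            = ((List.count v (PySem.Int.bxor cur x :: seen) : Nat) : Int) := by
        intro v
        rw [PySem.Dict.getD_insert]
        by_cases h : v = PySem.Int.bxor cur x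
        · subst h; simp [hm]
        · have h' : (PySem.Int.bxor cur x == v) = false := by simp [Ne.symm h]
          simp [h, h', List.count_cons, hm]
      rw [ih _ (PySem.Int.bxor cur x :: seen) _ _ hm']
      simp only [List.map_cons, List.sum_cons, PySem.Int.bxor_self]
      rw [map_sxInner_shift t cur x rest seen]
      have houter : sxOuter t rest = sxOuter t rest.tail + sxInner t 0 rest :=
        sxOuter_eq_tail t rest
      simp only [sxInner, List.tail_cons, hm, houter]
      by_cases h : PySem.Int.bxor cur x = t <;> simp [h] <;> ring

-- ===== VERDICT (by name: the statement is the Claim_ definition above) =====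
theorem subarray_xor_spec : Claim_equal_subarray_xor := by
  intro arr target_xor _
  unfold Spec_subarray_xor subarray_xor subarray_xor_alt
  rw [fold_invariant target_xor arr PySem.Dict.empty [] 0 0 (by intro v; simp)]
  simp [← sxOuter_eq_tail]
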